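-- pv_equiv track=rewrite | github.com/Denish-Pasupuleti/UG_Projects | 201/Projects/proj3/proj3.py | row_fill
-- ===== SOURCE A (Python) =====
-- BLACK = "X"
--
-- WHITE = "O"
--
-- REST_ROW = 2
--
-- def row_fill(row, color):
--     """
--     This fills the row and just adds the color to the beginning of the list
--
--     :param row: board[0] row
--     :param color: first color the function finds
--     :return: returns recursively rhe color to be added and the
--     rest of the row so the color just gets added to the list
--     """
--     if len(row) == 1:
--         return [color]
--     if len(row) > 2:
--         if row[0] == BLACK and row[1] == WHITE:
--             color = [BLACK, WHITE]
--             return color + row_fill(row[REST_ROW:], color[1])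
--         elif row[0] == WHITE and row[1] == BLACK:
--             color = [WHITE, BLACK]
--             return color + row_fill(row[REST_ROW:], color[1])
--     return [color] + row_fill(row[1:], color)
-- ===== SOURCE B (Python) =====
-- BLACK = "X"
--
-- WHITE = "O"
--
-- REST_ROW = 2
--
-- def row_fill(row, color):
--     # Iterative single pass with an index pointer: no slicing, no recursion.
--     out = []
--     i = 0
--     n = len(row)
--     while n - i > 1:
--         if n - i > 2 and row[i] == BLACK and row[i + 1] == WHITE:
--             out.append(BLACK)
--             out.append(WHITE)
--             color = WHITE
--             i += 2
--         elif n - i > 2 and row[i] == WHITE and row[i + 1] == BLACK: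
--             out.append(WHITE)
--             out.append(BLACK)
--             color = BLACK
--             i += 2
--         else:
--             out.append(color)
--             i += 1
--     out.append(color)
--     return out
-- ===== Notes on version B (the rewrite author's own statement) =====
-- stated objective: alternative
-- what changed: Replaced the recursion that slices the remaining row at every step with a single iterative pass over an index pointer that appends into one output list.
import Mathlib
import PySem

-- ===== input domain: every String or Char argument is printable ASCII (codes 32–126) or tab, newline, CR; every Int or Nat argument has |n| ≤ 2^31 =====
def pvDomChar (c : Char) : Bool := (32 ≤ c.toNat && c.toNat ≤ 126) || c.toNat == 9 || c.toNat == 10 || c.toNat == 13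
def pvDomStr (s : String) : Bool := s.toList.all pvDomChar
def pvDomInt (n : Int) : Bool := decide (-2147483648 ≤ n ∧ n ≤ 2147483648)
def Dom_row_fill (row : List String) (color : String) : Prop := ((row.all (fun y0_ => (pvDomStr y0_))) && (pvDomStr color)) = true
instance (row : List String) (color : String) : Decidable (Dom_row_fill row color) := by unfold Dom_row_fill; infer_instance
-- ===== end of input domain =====

-- B replaces A's recursion-with-slicing by a single iterative pass with an index pointer, appending into one output list.

-- ===== PORT A =====
-- Literal port of A's recursion, branch for branch: 'len(row) == 1' is the singleton arm, 'len(row) > 2' the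
-- three-or-more arm (row[0], row[1] are its first two elements; row[2:], row[1:] are the structural tails),
-- and the final 'return [color] + row_fill(row[1:], color)' covers the two-element arm.
-- On [] Python A recurses forever (RecursionError); that input is excluded by Pre_, the port returns [color] there.
def row_fill (row : List String) (color : String) : List String :=
  match row with
  | [] => [color]  -- unreachable under Pre_row_fill (Python A raises RecursionError on [])
  | [_] => [color]
  | [a, b] =>
    -- len == 2: neither 'if' fires, fall through to [color] + row_fill(row[1:], color)
    let _ := a
    [color] ++ row_fill [b] color
  | a :: b :: c :: rest =>
    if a = "X" ∧ b = "O" then ["X", "O"] ++ row_fill (c :: rest) "O"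
    else if a = "O" ∧ b = "X" then ["O", "X"] ++ row_fill (c :: rest) "X"
    else [color] ++ row_fill (b :: c :: rest) color

-- ===== PORT B =====
-- Port of Source B's while loop: index i into row, out accumulated by appending; fuel (initially n) only
-- totalizes the loop — each iteration advances i by at least 1, so fuel never runs out while n - i > 1.
def rowFillGo (row : List String) (n : Nat) (fuel : Nat) (i : Nat) (color : String) (out : List String) : List String :=
  match fuel with
  | 0 => out ++ [color]
  | fuel + 1 =>
    if n - i > 1 then
      if n - i > 2 ∧ PySem.List.pyGet? row (i : Int) = some "X"
          ∧ PySem.List.pyGet? row ((i : Int) + 1) = some "O" then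
        rowFillGo row n fuel (i + 2) "O" (out ++ ["X", "O"])
      else if n - i > 2 ∧ PySem.List.pyGet? row (i : Int) = some "O"
          ∧ PySem.List.pyGet? row ((i : Int) + 1) = some "X" then
        rowFillGo row n fuel (i + 2) "X" (out ++ ["O", "X"])
      else
        rowFillGo row n fuel (i + 1) color (out ++ [color])
    else out ++ [color]

def row_fill_alt (row : List String) (color : String) : List String :=
  rowFillGo row row.length row.length 0 color []

-- ===== PRECONDITION & SPEC =====
-- Pre_ excludes only the empty row, on which Python A raises RecursionError.
def Pre_row_fill (row : List String) (color : String) : Prop := row ≠ []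
instance (row : List String) (color : String) : Decidable (Pre_row_fill row color) := by unfold Pre_row_fill; infer_instance
def pvWitness_row_fill : List String × String := (["X", "O", "X"], "X")

def Spec_row_fill (row : List String) (color : String) (out : List String) : Prop := out = row_fill_alt row color
instance (row : List String) (color : String) (out : List String) : Decidable (Spec_row_fill row color out) := by unfold Spec_row_fill; infer_instance

-- ===== CLAIM (what is proved, stated in full; the proofs are below) =====
def Claim_equal_row_fill : Prop := ∀ (row : List String) (color : String), Dom_row_fill row color → Pre_row_fill row color → Spec_row_fill row color (row_fill row color)

-- ===== LEMMAS AND PROOFS =====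

-- Loop invariant: with n = row.length and enough fuel, B's loop starting at index i with accumulator out
-- produces out ++ (A's recursion applied to the remaining suffix row.drop i).
lemma rowFillGo_eq (row : List String) :
    ∀ fuel i color out, row.length - i ≤ fuel →
      rowFillGo row row.length fuel i color out = out ++ row_fill (row.drop i) color := by
  intro fuel
  induction fuel with
  | zero =>
    intro i color out h
    have hd : row.drop i = [] := List.drop_eq_nil_of_le (by omega)
    simp [rowFillGo, hd, row_fill]
  | succ m ih =>
    intro i color out h
    rw [rowFillGo]
    rw [show ((i : Int) + 1) = ((i + 1 : Nat) : Int) from by push_cast; ring]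
    simp only [PySem.List.pyGet?_natCast]
    have hlen : (row.drop i).length = row.length - i := List.length_drop
    by_cases h1 : 1 < row.length - i
    · rw [if_pos h1]
      rcases hd : row.drop i with _ | ⟨a, _ | ⟨b, t⟩⟩
      · rw [hd] at hlen; simp at hlen; omega
      · rw [hd] at hlen; simp at hlen; omega
      have e0 : row[i]? = some a := by
        have h0 : (List.drop i row)[0]? = row[i + 0]? := List.getElem?_drop
        rw [hd] at h0; simpa using h0.symm
      have e1 : row[i + 1]? = some b := by
        have h0 : (List.drop i row)[1]? = row[i + 1]? := List.getElem?_drop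
        rw [hd] at h0; simpa using h0.symm
      have ed1 : row.drop (i + 1) = b :: t := by
        rw [show row.drop (i + 1) = (row.drop i).drop 1 from by rw [List.drop_drop], hd]
        rfl
      by_cases h2 : 2 < row.length - i
      · -- at least three elements remain: row.drop i = a :: b :: c :: rest
        rcases t with _ | ⟨c, rest⟩
        · rw [hd] at hlen; simp at hlen; omega
        have ed2 : row.drop (i + 2) = c :: rest := by
          rw [show row.drop (i + 2) = (row.drop i).drop 2 from by rw [List.drop_drop], hd]
          rfl
        by_cases hxo : a = "X" ∧ b = "O"
        · rw [if_pos ⟨h2, by rw [e0, hxo.1], by rw [e1, hxo.2]⟩,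
             ih (i + 2) "O" (out ++ ["X", "O"]) (by omega), ed2]
          simp [row_fill, hxo.1, hxo.2]
        · rw [if_neg (by simp only [e0, e1, Option.some.injEq]
                         exact fun hc => hxo ⟨hc.2.1, hc.2.2⟩)]
          by_cases hox : a = "O" ∧ b = "X"
          · rw [if_pos ⟨h2, by rw [e0, hox.1], by rw [e1, hox.2]⟩,
               ih (i + 2) "X" (out ++ ["O", "X"]) (by omega), ed2]
            simp [row_fill, hox.1, hox.2]
          · rw [if_neg (by simp only [e0, e1, Option.some.injEq]
                           exact fun hc => hox ⟨hc.2.1, hc.2.2⟩),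
               ih (i + 1) color (out ++ [color]) (by omega), ed1]
            simp [row_fill, if_neg hxo, if_neg hox]
      · -- exactly two elements remain: row.drop i = [a, b]
        have ht : t = [] := by
          rw [hd] at hlen
          cases t with
          | nil => rfl
          | cons x xs => simp at hlen; omega
        subst ht
        rw [if_neg (fun hc => h2 hc.1), if_neg (fun hc => h2 hc.1),
           ih (i + 1) color (out ++ [color]) (by omega), ed1]
        simp [row_fill]
    · rw [if_neg h1]
      rcases hd : row.drop i with _ | ⟨a, _ | ⟨b, t⟩⟩
      · simp [row_fill]
      · simp [row_fill]
      · rw [hd] at hlen; simp at hlen; omega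

-- ===== VERDICT (by name: the statement is the Claim_ definition above) =====
theorem row_fill_spec : Claim_equal_row_fill := by
  intro row color _ _
  unfold Spec_row_fill row_fill_alt
  rw [rowFillGo_eq row row.length 0 color [] (by omega)]
  simp
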